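-- pv_equiv track=rewrite | github.com/jsymons/base-python-curriculum | unit-18-quiz-week-2/lesson-3-sum-of-dict-values/solutions/solution_.py | sum_of_dict_values
-- ===== SOURCE A (Python) =====
-- def sum_of_dict_values(d1, d2, d3):
--     result = {}
--     for key, value in d1.items():
--         result.setdefault(key, 0)
--         if result[key] is not None and type(value) is int:
--             result[key] += value
--         else:
--             result[key] = None
--
--     for key, value in d2.items():
--         result.setdefault(key, 0)
--         if result[key] is not None and type(value) is int:
--             result[key] += value
--         else:
--             result[key] = None
--
--     for key, value in d3.items():
--         result.setdefault(key, 0)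
--         if result[key] is not None and type(value) is int:
--             result[key] += value
--         else:
--             result[key] = None
--     return result
-- ===== SOURCE B (Python) =====
-- def sum_of_dict_values(d1, d2, d3):
--     result = {}
--     for key in dict.fromkeys([*d1, *d2, *d3]):
--         vals = [d[key] for d in (d1, d2, d3) if key in d]
--         result[key] = sum(vals) if all(type(v) is int for v in vals) else None
--     return result
-- ===== Notes on version B (the rewrite author's own statement) =====
-- stated objective: alternative
-- what changed: Replaces the three sequential sticky-sentinel accumulation passes over a shared result dict by a single per-key pass: build the ordered union of keys, gather each key's values across the three dicts, and emit the sum or None in one step; Pre_ only excludes association lists with duplicate keys inside one dict, which do not represent any Python dict.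
import Mathlib
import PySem

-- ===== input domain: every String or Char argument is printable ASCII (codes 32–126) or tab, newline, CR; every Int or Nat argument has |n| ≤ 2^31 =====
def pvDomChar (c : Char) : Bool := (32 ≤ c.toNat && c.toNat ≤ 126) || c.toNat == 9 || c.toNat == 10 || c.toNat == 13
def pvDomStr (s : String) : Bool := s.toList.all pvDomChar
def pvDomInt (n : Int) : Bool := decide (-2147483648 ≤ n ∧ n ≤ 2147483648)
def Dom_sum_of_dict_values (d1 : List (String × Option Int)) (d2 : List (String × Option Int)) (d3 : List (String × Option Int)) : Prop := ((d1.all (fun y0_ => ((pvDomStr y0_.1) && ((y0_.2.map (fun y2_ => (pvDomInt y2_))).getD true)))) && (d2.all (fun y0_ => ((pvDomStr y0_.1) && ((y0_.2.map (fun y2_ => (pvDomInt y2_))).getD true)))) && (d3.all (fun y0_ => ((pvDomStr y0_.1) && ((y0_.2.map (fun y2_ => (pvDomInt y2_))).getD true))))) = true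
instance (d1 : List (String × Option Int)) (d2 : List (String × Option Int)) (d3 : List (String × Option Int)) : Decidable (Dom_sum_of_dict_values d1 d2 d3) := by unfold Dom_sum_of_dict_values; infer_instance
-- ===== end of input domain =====

-- B replaces A's three sticky-sentinel accumulation passes over a shared result dict
-- by one per-key pass (ordered key union, then gather-and-check); same cost class.

-- ===== PORT A =====
-- one loop body: result.setdefault(key, 0); if result[key] is not None and type(value) is int: += else None
def sodvStep (r : PySem.Dict String (Option Int)) (p : String × Option Int) : PySem.Dict String (Option Int) :=
  let r1 := r.setdefault p.1 (some 0)
  match r1.getD p.1 none, p.2 with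
  | some c, some v => r1.insert p.1 (some (c + v))
  | _, _ => r1.insert p.1 none

-- one 'for key, value in d.items():' loop
def sodvPass (r : PySem.Dict String (Option Int)) (d : List (String × Option Int)) : PySem.Dict String (Option Int) :=
  d.foldl sodvStep r

def sum_of_dict_values (d1 : List (String × Option Int)) (d2 : List (String × Option Int)) (d3 : List (String × Option Int)) : List (String × Option Int) :=
  (sodvPass (sodvPass (sodvPass PySem.Dict.empty d1) d2) d3).items

-- ===== PORT B =====
def sum_of_dict_values_alt (d1 : List (String × Option Int)) (d2 : List (String × Option Int)) (d3 : List (String × Option Int)) : List (String × Option Int) :=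
  -- for key in dict.fromkeys([*d1, *d2, *d3])
  (PySem.List.dedup (d1.map Prod.fst ++ d2.map Prod.fst ++ d3.map Prod.fst)).map (fun k =>
    -- vals = [d[key] for d in (d1, d2, d3) if key in d]
    let vals := [d1, d2, d3].flatMap (fun d => match d.lookup k with | some v => [v] | none => [])
    -- sum(vals) if all(type(v) is int for v in vals) else None
    (k, if vals.all Option.isSome then some ((vals.map (fun v => v.getD 0)).foldl (· + ·) 0) else none))

-- ===== PRECONDITION & SPEC =====
-- Pre_ excludes only association lists with a duplicated key inside one argument:
-- those do not represent any Python dict (the function's arguments are dicts).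
def Pre_sum_of_dict_values (d1 : List (String × Option Int)) (d2 : List (String × Option Int)) (d3 : List (String × Option Int)) : Prop :=
  (d1.map Prod.fst).Nodup ∧ (d2.map Prod.fst).Nodup ∧ (d3.map Prod.fst).Nodup
instance (d1 : List (String × Option Int)) (d2 : List (String × Option Int)) (d3 : List (String × Option Int)) : Decidable (Pre_sum_of_dict_values d1 d2 d3) := by unfold Pre_sum_of_dict_values; infer_instance
def pvWitness_sum_of_dict_values : (List (String × Option Int)) × (List (String × Option Int)) × (List (String × Option Int)) :=
  ([("a", some 1), ("b", none)], [("a", some 2)], [("c", some 3)])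
def Spec_sum_of_dict_values (d1 : List (String × Option Int)) (d2 : List (String × Option Int)) (d3 : List (String × Option Int)) (out : List (String × Option Int)) : Prop := out = sum_of_dict_values_alt d1 d2 d3
instance (d1 : List (String × Option Int)) (d2 : List (String × Option Int)) (d3 : List (String × Option Int)) (out : List (String × Option Int)) : Decidable (Spec_sum_of_dict_values d1 d2 d3 out) := by unfold Spec_sum_of_dict_values; infer_instance

-- ===== CLAIM (what is proved, stated in full; the proofs are below) =====
def Claim_equal_sum_of_dict_values : Prop := ∀ (d1 : List (String × Option Int)) (d2 : List (String × Option Int)) (d3 : List (String × Option Int)), Dom_sum_of_dict_values d1 d2 d3 → Pre_sum_of_dict_values d1 d2 d3 → Spec_sum_of_dict_values d1 d2 d3 (sum_of_dict_values d1 d2 d3)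

-- ===== LEMMAS AND PROOFS =====
-- reference form: values recorded at key k over a single pair stream, and A's sticky combine
def sodvVals (L : List (String × Option Int)) (k : String) : List (Option Int) :=
  L.filterMap (fun p => if p.1 = k then some p.2 else none)

def sodvComb (vs : List (Option Int)) : Option Int :=
  if vs.all Option.isSome then some ((vs.map (fun v => v.getD 0)).foldl (· + ·) 0) else none

theorem sodvComb_snoc (vs : List (Option Int)) (v : Option Int) :
    sodvComb (vs ++ [v]) =
      match sodvComb vs, v with
      | some c, some x => some (c + x)
      | _, _ => none := by
  simp only [sodvComb, List.all_append, List.map_append, List.foldl_append]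
  cases h : vs.all Option.isSome <;> cases v <;> simp

theorem sodvVals_snoc (L : List (String × Option Int)) (p : String × Option Int) (k : String) :
    sodvVals (L ++ [p]) k = sodvVals L k ++ (if p.1 = k then [p.2] else []) := by
  simp only [sodvVals, List.filterMap_append]
  split_ifs with h <;> simp [h]

theorem sodvVals_nil_of_not_mem (L : List (String × Option Int)) (k : String)
    (h : k ∉ L.map Prod.fst) : sodvVals L k = [] := by
  induction L with
  | nil => rfl
  | cons q t ih =>
    simp only [List.map_cons, List.mem_cons, not_or] at h
    simp only [sodvVals, List.filterMap_cons]
    have : ¬ q.1 = k := fun hq => h.1 hq.symm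
    simp only [if_neg this]
    exact ih h.2


theorem sodv_dedup_snoc (xs : List String) (x : String) :
    PySem.List.dedup (xs ++ [x]) = if x ∈ xs then PySem.List.dedup xs else PySem.List.dedup xs ++ [x] := by
  simp only [PySem.List.dedup_eq_ofList, PySem.Set.ofList_eq_foldl, List.foldl_append,
    List.foldl_cons, List.foldl_nil]
  rw [show (xs.foldl PySem.Set.add []) = PySem.Set.ofList xs from (PySem.Set.ofList_eq_foldl xs).symm]
  simp only [PySem.Set.add]
  by_cases hx : x ∈ xs
  · simp [PySem.Set.contains, PySem.Set.mem_ofList, hx]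
  · simp [PySem.Set.contains, PySem.Set.mem_ofList, hx]

-- the invariant of A's folds: the dict's items are the reference form of the processed prefix
theorem sodv_foldl_items (L : List (String × Option Int)) :
    (L.foldl sodvStep PySem.Dict.empty).items
      = (PySem.List.dedup (L.map Prod.fst)).map (fun k => (k, sodvComb (sodvVals L k))) := by
  induction L using List.reverseRecOn with
  | nil => rfl
  | append_singleton L p ih =>
    have hkeys : (L.foldl sodvStep PySem.Dict.empty).keys = PySem.List.dedup (L.map Prod.fst) := by
      simp only [PySem.Dict.keys, ih, List.map_map]
      simp [Function.comp_def]
    have hnodup : (L.foldl sodvStep PySem.Dict.empty).keys.Nodup := by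
      rw [hkeys]; exact PySem.List.nodup_dedup _
    rw [List.foldl_append, List.foldl_cons, List.foldl_nil]
    generalize hr : L.foldl sodvStep PySem.Dict.empty = r at ih hkeys hnodup ⊢
    have hmapf : (L ++ [p]).map Prod.fst = L.map Prod.fst ++ [p.1] := by simp
    by_cases hmem : p.1 ∈ L.map Prod.fst
    · -- key already present: setdefault is a no-op, insert replaces in place
      have hitem : (p.1, sodvComb (sodvVals L p.1)) ∈ r.items := by
        rw [ih]
        exact List.mem_map_of_mem ((PySem.List.mem_dedup _ _).mpr hmem)
      have hcont : r.contains p.1 = true := by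
        rw [PySem.Dict.contains_eq_isSome_get?,
            PySem.Dict.get?_of_mem_items r hitem hnodup]
        rfl
      have hget : r.getD p.1 none = sodvComb (sodvVals L p.1) :=
        PySem.Dict.getD_of_mem_items r hitem hnodup none
      have hsd : r.setdefault p.1 (some 0) = r := by
        simp [PySem.Dict.setdefault, hcont]
      have hdedup : PySem.List.dedup ((L ++ [p]).map Prod.fst) = PySem.List.dedup (L.map Prod.fst) := by
        rw [hmapf, sodv_dedup_snoc, if_pos hmem]
      have key : ∀ w, w = sodvComb (sodvVals (L ++ [p]) p.1) →
          (r.insert p.1 w).items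
            = (PySem.List.dedup ((L ++ [p]).map Prod.fst)).map
                (fun k => (k, sodvComb (sodvVals (L ++ [p]) k))) := by
        intro w hwv
        rw [PySem.Dict.items_insert_of_contains r w hcont, ih, List.map_map, hdedup]
        apply List.map_congr_left
        intro k hk
        by_cases hkp : k = p.1
        · subst hkp; simp [hwv]
        · have hne : (k == p.1) = false := by simp [hkp]
          simp only [Function.comp, hne, Bool.false_eq_true, if_false,
            sodvVals_snoc, Prod.mk.injEq]
          rw [if_neg (fun h => hkp (Eq.symm h))]
          simp
      simp only [sodvStep, hsd, hget]
      cases hc : sodvComb (sodvVals L p.1) with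
      | none =>
        cases hv : p.2 with
        | none => exact key none (by rw [sodvVals_snoc, if_pos rfl, sodvComb_snoc, hc, hv])
        | some v => exact key none (by rw [sodvVals_snoc, if_pos rfl, sodvComb_snoc, hc, hv])
      | some c =>
        cases hv : p.2 with
        | none => exact key none (by rw [sodvVals_snoc, if_pos rfl, sodvComb_snoc, hc, hv])
        | some v => exact key (some (c + v)) (by rw [sodvVals_snoc, if_pos rfl, sodvComb_snoc, hc, hv])
    · -- new key: setdefault appends (p.1, some 0), insert overwrites it in place
      have hcont : r.contains p.1 = false := by
        rw [PySem.Dict.contains_eq_decide_mem_keys, hkeys]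
        simp [hmem]
      have hsd : r.setdefault p.1 (some 0) = r.insert p.1 (some 0) := by
        simp [PySem.Dict.setdefault, hcont]
        apply PySem.Dict.ext
        rw [PySem.Dict.items_insert_of_not_contains r (some 0) hcont]
      have hget : (r.insert p.1 (some 0)).getD p.1 none = some 0 :=
        PySem.Dict.getD_insert_self ..
      have hvals0 : sodvVals L p.1 = [] := sodvVals_nil_of_not_mem _ _ hmem
      have hcomb0 : sodvComb (sodvVals (L ++ [p]) p.1)
          = (match (some 0 : Option Int), p.2 with
             | some c, some x => some (c + x) | _, _ => none) := by
        rw [sodvVals_snoc, hvals0, if_pos rfl]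
        rw [show ([] : List (Option Int)) ++ [p.2] = [] ++ [p.2] from rfl, sodvComb_snoc]
        rfl
      have hdedup : PySem.List.dedup ((L ++ [p]).map Prod.fst)
          = PySem.List.dedup (L.map Prod.fst) ++ [p.1] := by
        rw [hmapf, sodv_dedup_snoc, if_neg hmem]
      have key : ∀ w, w = sodvComb (sodvVals (L ++ [p]) p.1) →
          ((r.insert p.1 (some 0)).insert p.1 w).items
            = (PySem.List.dedup ((L ++ [p]).map Prod.fst)).map
                (fun k => (k, sodvComb (sodvVals (L ++ [p]) k))) := by
        intro w hwv
        have hcont' : (r.insert p.1 (some 0)).contains p.1 = true :=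
          PySem.Dict.contains_insert_self ..
        rw [PySem.Dict.items_insert_of_contains _ w hcont',
            PySem.Dict.items_insert_of_not_contains r (some 0) hcont, ih, hdedup]
        rw [List.map_append, List.map_append, List.map_map]
        congr 1
        · apply List.map_congr_left
          intro k hk
          have hkL : k ∈ L.map Prod.fst := (PySem.List.mem_dedup _ _).mp hk
          have hkp : k ≠ p.1 := fun h => hmem (h ▸ hkL)
          have hne : (k == p.1) = false := by simp [hkp]
          simp only [Function.comp, hne, Bool.false_eq_true, if_false,
            sodvVals_snoc, Prod.mk.injEq]
          rw [if_neg (fun h => hkp (Eq.symm h))]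
          simp
        · simp [hwv]
      simp only [sodvStep, hsd, hget]
      cases hv : p.2 with
      | none => exact key none (by rw [hcomb0, hv])
      | some v => exact key (some (0 + v)) (by rw [hcomb0, hv])

-- B-side: per-dict lookup gathering equals the reference value stream, given unique keys
theorem sodv_lookup_vals (d : List (String × Option Int)) (k : String)
    (hn : (d.map Prod.fst).Nodup) :
    (match d.lookup k with | some v => [v] | none => ([] : List (Option Int))) = sodvVals d k := by
  induction d with
  | nil => rfl
  | cons q t ih =>
    simp only [List.map_cons, List.nodup_cons] at hn
    by_cases hq : q.1 = k
    · subst hq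
      have ht : List.filterMap (fun p => if p.1 = q.1 then some p.2 else none) t = [] :=
        sodvVals_nil_of_not_mem t q.1 hn.1
      simp [List.lookup, sodvVals, ht]
    · have h1 : (k == q.1) = false := by
        rw [beq_eq_false_iff_ne]
        exact fun h => hq (Eq.symm h)
      simp only [List.lookup, h1, sodvVals, List.filterMap_cons, if_neg hq]
      exact ih hn.2

theorem sodv_alt_eq_ref (d1 d2 d3 : List (String × Option Int))
    (h1 : (d1.map Prod.fst).Nodup) (h2 : (d2.map Prod.fst).Nodup) (h3 : (d3.map Prod.fst).Nodup) :
    sum_of_dict_values_alt d1 d2 d3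
      = (PySem.List.dedup (((d1 ++ d2) ++ d3).map Prod.fst)).map
          (fun k => (k, sodvComb (sodvVals ((d1 ++ d2) ++ d3) k))) := by
  unfold sum_of_dict_values_alt
  have hmapf : ((d1 ++ d2) ++ d3).map Prod.fst
      = d1.map Prod.fst ++ d2.map Prod.fst ++ d3.map Prod.fst := by simp
  rw [hmapf]
  apply List.map_congr_left
  intro k hk
  have hvals : [d1, d2, d3].flatMap
      (fun d => match d.lookup k with | some v => [v] | none => ([] : List (Option Int)))
      = sodvVals ((d1 ++ d2) ++ d3) k := by
    simp only [List.flatMap_cons, List.flatMap_nil, List.append_nil]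
    rw [sodv_lookup_vals d1 k h1, sodv_lookup_vals d2 k h2, sodv_lookup_vals d3 k h3]
    simp [sodvVals, List.filterMap_append]
  simp only [hvals, sodvComb]

-- ===== VERDICT (by name: the statement is the Claim_ definition above) =====
theorem sum_of_dict_values_spec : Claim_equal_sum_of_dict_values := by
  intro d1 d2 d3 _ hpre
  obtain ⟨h1, h2, h3⟩ := hpre
  unfold Spec_sum_of_dict_values
  unfold sum_of_dict_values sodvPass
  rw [← List.foldl_append, ← List.foldl_append]
  rw [sodv_foldl_items, sodv_alt_eq_ref d1 d2 d3 h1 h2 h3, List.append_assoc]
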